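-- pv_equiv track=rewrite | github.com/jobsaver/jobmato_chatbot_python | agents/career_advice_agent.py | _classify_advice_type
-- ===== SOURCE A (Python) =====
-- def _classify_advice_type(query: str) -> str:
--     """Classify the type of career advice being requested"""
--     query_lower = query.lower()
--
--     if any(word in query_lower for word in ['switch', 'change', 'transition', 'shift']):
--         return 'career_transition'
--     elif any(word in query_lower for word in ['skill', 'learn', 'course', 'training']):
--         return 'skill_development'
--     elif any(word in query_lower for word in ['interview', 'preparation', 'tips']):
--         return 'interview_prep'
--     elif any(word in query_lower for word in ['salary', 'negotiate', 'pay', 'compensation']):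
--         return 'salary_negotiation'
--     elif any(word in query_lower for word in ['network', 'linkedin', 'connections']):
--         return 'networking'
--     elif any(word in query_lower for word in ['resume', 'cv', 'profile']):
--         return 'resume_improvement'
--     else:
--         return 'general_guidance'
-- ===== SOURCE B (Python) =====
-- # B: exhaustive flat keyword scan keeping the minimum-priority match, instead of
-- # an ordered short-circuiting branch chain.
-- _KEYWORDS = [
--     ('switch', 0, 'career_transition'), ('change', 0, 'career_transition'),
--     ('transition', 0, 'career_transition'), ('shift', 0, 'career_transition'),
--     ('skill', 1, 'skill_development'), ('learn', 1, 'skill_development'),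
--     ('course', 1, 'skill_development'), ('training', 1, 'skill_development'),
--     ('interview', 2, 'interview_prep'), ('preparation', 2, 'interview_prep'),
--     ('tips', 2, 'interview_prep'),
--     ('salary', 3, 'salary_negotiation'), ('negotiate', 3, 'salary_negotiation'),
--     ('pay', 3, 'salary_negotiation'), ('compensation', 3, 'salary_negotiation'),
--     ('network', 4, 'networking'), ('linkedin', 4, 'networking'),
--     ('connections', 4, 'networking'),
--     ('resume', 5, 'resume_improvement'), ('cv', 5, 'resume_improvement'),
--     ('profile', 5, 'resume_improvement'),
-- ]
--
-- def _classify_advice_type(query: str) -> str: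
--     query_lower = query.lower()
--     best = None  # (rank, label) of the best (lowest-rank) keyword seen so far
--     for word, rank, label in _KEYWORDS:
--         if word in query_lower and (best is None or rank < best[0]):
--             best = (rank, label)
--     return best[1] if best is not None else 'general_guidance'
-- ===== Notes on version B (the rewrite author's own statement) =====
-- stated objective: alternative
-- what changed: Replaces the short-circuiting if/elif branch chain with one exhaustive pass over a flat (keyword, rank, label) list that keeps the minimum-rank match in an accumulator and labels it at the end.
import Mathlib
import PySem

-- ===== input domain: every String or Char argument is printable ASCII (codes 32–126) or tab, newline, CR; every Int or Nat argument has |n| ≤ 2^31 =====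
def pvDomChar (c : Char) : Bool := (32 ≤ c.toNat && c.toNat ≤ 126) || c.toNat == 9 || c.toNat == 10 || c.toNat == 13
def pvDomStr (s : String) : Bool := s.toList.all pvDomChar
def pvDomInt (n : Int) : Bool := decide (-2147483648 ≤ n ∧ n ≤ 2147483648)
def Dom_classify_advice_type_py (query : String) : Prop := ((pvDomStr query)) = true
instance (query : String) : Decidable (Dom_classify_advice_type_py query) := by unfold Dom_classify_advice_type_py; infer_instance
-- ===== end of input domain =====

-- B replaces A's short-circuiting if/elif chain with one exhaustive pass over a flat (keyword, rank, label) list keeping the minimum-rank match (objective: alternative).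


-- ===== PORT A =====
def classify_advice_type_py (query : String) : String :=
  let query_lower := PySem.Str.lower query
  if ["switch", "change", "transition", "shift"].any (fun word => PySem.Str.isIn word query_lower) then
    "career_transition"
  else if ["skill", "learn", "course", "training"].any (fun word => PySem.Str.isIn word query_lower) then
    "skill_development"
  else if ["interview", "preparation", "tips"].any (fun word => PySem.Str.isIn word query_lower) then
    "interview_prep"
  else if ["salary", "negotiate", "pay", "compensation"].any (fun word => PySem.Str.isIn word query_lower) then
    "salary_negotiation"
  else if ["network", "linkedin", "connections"].any (fun word => PySem.Str.isIn word query_lower) then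
    "networking"
  else if ["resume", "cv", "profile"].any (fun word => PySem.Str.isIn word query_lower) then
    "resume_improvement"
  else
    "general_guidance"

-- ===== PORT B =====
-- the flat (keyword, rank, label) list of Source B
def kwEntries : List (String × Nat × String) :=
  [("switch", 0, "career_transition"), ("change", 0, "career_transition"),
   ("transition", 0, "career_transition"), ("shift", 0, "career_transition"),
   ("skill", 1, "skill_development"), ("learn", 1, "skill_development"),
   ("course", 1, "skill_development"), ("training", 1, "skill_development"),
   ("interview", 2, "interview_prep"), ("preparation", 2, "interview_prep"),
   ("tips", 2, "interview_prep"),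
   ("salary", 3, "salary_negotiation"), ("negotiate", 3, "salary_negotiation"),
   ("pay", 3, "salary_negotiation"), ("compensation", 3, "salary_negotiation"),
   ("network", 4, "networking"), ("linkedin", 4, "networking"),
   ("connections", 4, "networking"),
   ("resume", 5, "resume_improvement"), ("cv", 5, "resume_improvement"),
   ("profile", 5, "resume_improvement")]

-- one loop iteration of Source B: keep the lowest-rank matching keyword seen so far
def kwStep (q : String) (best : Option (Nat × String)) (e : String × Nat × String) : Option (Nat × String) :=
  if PySem.Str.isIn e.1 q && (match best with | none => true | some b => decide (e.2.1 < b.1)) then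
    some (e.2.1, e.2.2)
  else best

def classify_advice_type_py_alt (query : String) : String :=
  let query_lower := PySem.Str.lower query
  match kwEntries.foldl (kwStep query_lower) none with
  | some b => b.2
  | none => "general_guidance"

-- ===== PRECONDITION & SPEC =====
def Spec_classify_advice_type_py (query : String) (out : String) : Prop := out = classify_advice_type_py_alt query
instance (query : String) (out : String) : Decidable (Spec_classify_advice_type_py query out) := by unfold Spec_classify_advice_type_py; infer_instance

-- ===== CLAIM (what is proved, stated in full; the proofs are below) =====
def Claim_equal_classify_advice_type_py : Prop := ∀ (query : String), Dom_classify_advice_type_py query → Spec_classify_advice_type_py query (classify_advice_type_py query)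

-- ===== LEMMAS AND PROOFS =====

-- the six single-rank groups of kwEntries, as map expressions (proof-only helpers)
def gm0 : List (String × Nat × String) := ["switch", "change", "transition", "shift"].map (fun w => (w, 0, "career_transition"))
def gm1 : List (String × Nat × String) := ["skill", "learn", "course", "training"].map (fun w => (w, 1, "skill_development"))
def gm2 : List (String × Nat × String) := ["interview", "preparation", "tips"].map (fun w => (w, 2, "interview_prep"))
def gm3 : List (String × Nat × String) := ["salary", "negotiate", "pay", "compensation"].map (fun w => (w, 3, "salary_negotiation"))
def gm4 : List (String × Nat × String) := ["network", "linkedin", "connections"].map (fun w => (w, 4, "networking"))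
def gm5 : List (String × Nat × String) := ["resume", "cv", "profile"].map (fun w => (w, 5, "resume_improvement"))

theorem kwEntries_split :
    kwEntries = gm0 ++ (gm1 ++ (gm2 ++ (gm3 ++ (gm4 ++ gm5)))) := by rfl

-- once the accumulator holds a rank ≤ every remaining rank, the fold never changes it
theorem kw_fold_keeps (q : String) (l : List (String × Nat × String)) (r : Nat) (lbl : String)
    (h : ∀ e ∈ l, r ≤ e.2.1) :
    l.foldl (kwStep q) (some (r, lbl)) = some (r, lbl) := by
  induction l with
  | nil => rfl
  | cons e t ih =>
      have he : r ≤ e.2.1 := h e (by simp)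
      have hstep : kwStep q (some (r, lbl)) e = some (r, lbl) := by
        unfold kwStep
        have hd : decide (e.2.1 < r) = false := by simp; omega
        simp [hd]
      rw [List.foldl_cons, hstep]
      exact ih (fun e' he' => h e' (List.mem_cons_of_mem _ he'))

-- folding a single-rank group from an empty accumulator
theorem kw_fold_group (q : String) (ws : List String) (k : Nat) (lbl : String) :
    (ws.map (fun w => (w, k, lbl))).foldl (kwStep q) none =
      if ws.any (fun w => PySem.Str.isIn w q) then some (k, lbl) else none := by
  induction ws with
  | nil => rfl
  | cons w t ih =>
      rw [List.map_cons, List.foldl_cons]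
      by_cases hw : PySem.Str.isIn w q = true
      · have hstep : kwStep q none (w, k, lbl) = some (k, lbl) := by
          show (if PySem.Str.isIn w q && true then some (k, lbl) else none) = some (k, lbl)
          rw [hw]; simp
        have hkeep : (t.map (fun w => (w, k, lbl))).foldl (kwStep q) (some (k, lbl)) = some (k, lbl) := by
          apply kw_fold_keeps
          intro e he
          simp only [List.mem_map] at he
          obtain ⟨w', _, rfl⟩ := he
          exact le_refl k
        rw [hstep, hkeep, if_pos (by rw [List.any_cons]; simp only [hw, Bool.true_or])]
      · have hw' : PySem.Str.isIn w q = false := by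
          exact Bool.not_eq_true _ |>.mp hw
        have hstep : kwStep q none (w, k, lbl) = none := by
          show (if PySem.Str.isIn w q && true then some (k, lbl) else none) = none
          rw [hw']; simp
        rw [hstep, ih, List.any_cons]
        simp only [hw', Bool.false_or]

-- ===== VERDICT (by name: the statement is the Claim_ definition above) =====
theorem classify_advice_type_py_spec : Claim_equal_classify_advice_type_py := by
  intro query _
  unfold Spec_classify_advice_type_py
  simp only [classify_advice_type_py, classify_advice_type_py_alt, kwEntries_split]
  set q := PySem.Str.lower query with hq
  rw [List.foldl_append]
  rw [show gm0 = (["switch", "change", "transition", "shift"].map (fun w => (w, 0, "career_transition"))) from rfl, kw_fold_group]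
  by_cases h0 : (["switch", "change", "transition", "shift"].any (fun w => PySem.Str.isIn w q)) = true
  · have acc : (if (["switch", "change", "transition", "shift"].any (fun w => PySem.Str.isIn w q)) = true then some ((0 : Nat), "career_transition") else none) = some ((0 : Nat), "career_transition") := if_pos h0
    rw [acc, kw_fold_keeps q (gm1 ++ (gm2 ++ (gm3 ++ (gm4 ++ gm5)))) 0 "career_transition" (by decide), if_pos h0]
  · have acc : (if (["switch", "change", "transition", "shift"].any (fun w => PySem.Str.isIn w q)) = true then some ((0 : Nat), "career_transition") else none) = none := if_neg h0
    rw [acc, if_neg h0, List.foldl_append]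
    rw [show gm1 = (["skill", "learn", "course", "training"].map (fun w => (w, 1, "skill_development"))) from rfl, kw_fold_group]
    by_cases h1 : (["skill", "learn", "course", "training"].any (fun w => PySem.Str.isIn w q)) = true
    · have acc : (if (["skill", "learn", "course", "training"].any (fun w => PySem.Str.isIn w q)) = true then some ((1 : Nat), "skill_development") else none) = some ((1 : Nat), "skill_development") := if_pos h1
      rw [acc, kw_fold_keeps q (gm2 ++ (gm3 ++ (gm4 ++ gm5))) 1 "skill_development" (by decide), if_pos h1]
    · have acc : (if (["skill", "learn", "course", "training"].any (fun w => PySem.Str.isIn w q)) = true then some ((1 : Nat), "skill_development") else none) = none := if_neg h1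
      rw [acc, if_neg h1, List.foldl_append]
      rw [show gm2 = (["interview", "preparation", "tips"].map (fun w => (w, 2, "interview_prep"))) from rfl, kw_fold_group]
      by_cases h2 : (["interview", "preparation", "tips"].any (fun w => PySem.Str.isIn w q)) = true
      · have acc : (if (["interview", "preparation", "tips"].any (fun w => PySem.Str.isIn w q)) = true then some ((2 : Nat), "interview_prep") else none) = some ((2 : Nat), "interview_prep") := if_pos h2
        rw [acc, kw_fold_keeps q (gm3 ++ (gm4 ++ gm5)) 2 "interview_prep" (by decide), if_pos h2]
      · have acc : (if (["interview", "preparation", "tips"].any (fun w => PySem.Str.isIn w q)) = true then some ((2 : Nat), "interview_prep") else none) = none := if_neg h2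
        rw [acc, if_neg h2, List.foldl_append]
        rw [show gm3 = (["salary", "negotiate", "pay", "compensation"].map (fun w => (w, 3, "salary_negotiation"))) from rfl, kw_fold_group]
        by_cases h3 : (["salary", "negotiate", "pay", "compensation"].any (fun w => PySem.Str.isIn w q)) = true
        · have acc : (if (["salary", "negotiate", "pay", "compensation"].any (fun w => PySem.Str.isIn w q)) = true then some ((3 : Nat), "salary_negotiation") else none) = some ((3 : Nat), "salary_negotiation") := if_pos h3
          rw [acc, kw_fold_keeps q (gm4 ++ gm5) 3 "salary_negotiation" (by decide), if_pos h3]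
        · have acc : (if (["salary", "negotiate", "pay", "compensation"].any (fun w => PySem.Str.isIn w q)) = true then some ((3 : Nat), "salary_negotiation") else none) = none := if_neg h3
          rw [acc, if_neg h3, List.foldl_append]
          rw [show gm4 = (["network", "linkedin", "connections"].map (fun w => (w, 4, "networking"))) from rfl, kw_fold_group]
          by_cases h4 : (["network", "linkedin", "connections"].any (fun w => PySem.Str.isIn w q)) = true
          · have acc : (if (["network", "linkedin", "connections"].any (fun w => PySem.Str.isIn w q)) = true then some ((4 : Nat), "networking") else none) = some ((4 : Nat), "networking") := if_pos h4
            rw [acc, kw_fold_keeps q (gm5) 4 "networking" (by decide), if_pos h4]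
          · have acc : (if (["network", "linkedin", "connections"].any (fun w => PySem.Str.isIn w q)) = true then some ((4 : Nat), "networking") else none) = none := if_neg h4
            rw [acc, if_neg h4]
            rw [show gm5 = (["resume", "cv", "profile"].map (fun w => (w, 5, "resume_improvement"))) from rfl, kw_fold_group]
            by_cases h5 : (["resume", "cv", "profile"].any (fun w => PySem.Str.isIn w q)) = true
            · have acc : (if (["resume", "cv", "profile"].any (fun w => PySem.Str.isIn w q)) = true then some ((5 : Nat), "resume_improvement") else none) = some ((5 : Nat), "resume_improvement") := if_pos h5
              rw [acc, if_pos h5]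
            · have acc : (if (["resume", "cv", "profile"].any (fun w => PySem.Str.isIn w q)) = true then some ((5 : Nat), "resume_improvement") else none) = none := if_neg h5
              rw [acc, if_neg h5]
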